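-- pv_equiv track=rewrite | github.com/ZqBany/raspberry-pico-projects | child-boombox/helpers/vis.py | expand_left
-- ===== SOURCE A (Python) =====
-- SCALE = 1_000  # N decimal places instead of float normalization
--
-- def expand_left(data, left, window_size, window_size_threshold, shrink_edge_plateaus):
--     expanded_left = left
--     last_changed = left - 1
--     for i in range(max(0, left - 1), 0, -1):
--         if data[i] > data[i + 1]:
--             if data[i] > data[i+1] + int(SCALE*0.025):
--                 break
--             last_changed = i
--             if min(data[max(0, i - window_size):i - 1]) >= data[i]:
--                 break
--         elif data[i] < data[i+1]:
--             last_changed = i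
--         if data[i] < window_size_threshold and (last_changed - i) > window_size:
--             break
--         expanded_left = i
--
--     if shrink_edge_plateaus:
--         for i in range(expanded_left, left):
--             if data[i + 1] > data[i]:
--                 break
--             expanded_left = i
--     return expanded_left
-- ===== SOURCE B (Python) =====
-- def expand_left(data, left, window_size, window_size_threshold, shrink_edge_plateaus):
--     # Monotonic-deque sliding-window minimum: window-minimum queries read the
--     # back of the deque instead of re-scanning the slice, and the last_changed
--     # bookkeeping becomes a run-length counter.
--     start = left - 1
--     expanded_left = left
--     if start >= 1:
--         ws = window_size
--         # deque of candidate indices for the window [max(0, i-ws), i-2];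
--         # dq is appended right-to-left, dq[bp] = rightmost alive = minimum.
--         dq = []
--         bp = 0
--         lo = max(0, start - ws)
--         j = start - 2
--         while j >= lo:
--             while len(dq) > bp and data[dq[-1]] >= data[j]:
--                 dq.pop()
--             dq.append(j)
--             j -= 1
--         run = -1  # number of consecutive equal steps ending at current i
--         i = start
--         while i >= 1:
--             a = data[i]
--             b = data[i + 1]
--             if a > b and a > b + 25:
--                 break
--             if a > b and data[dq[bp]] >= a:  # window minimum = back of deque
--                 break
--             run = run + 1 if a == b else 0
--             if a < window_size_threshold and run > window_size:
--                 break
--             expanded_left = i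
--             # slide window to [max(0, i-1-ws), i-3]
--             while bp < len(dq) and dq[bp] > i - 3:
--                 bp += 1
--             jn = i - 1 - ws
--             if ws >= 2 and jn >= 0:
--                 while len(dq) > bp and data[dq[-1]] >= data[jn]:
--                     dq.pop()
--                 dq.append(jn)
--             i -= 1
--     if shrink_edge_plateaus:
--         # find the first ascent at or after expanded_left instead of
--         # re-walking with an accumulator
--         j = expanded_left
--         while j < left and data[j + 1] <= data[j]:
--             j += 1
--         expanded_left = max(expanded_left, j - 1)
--     return expanded_left
-- ===== Notes on version B (the rewrite author's own statement) =====
-- stated objective: alternative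
-- what changed: The per-step min-of-slice rescan is replaced by a monotonic-deque sliding-window minimum read off the back of the deque, the last_changed index by a run-length counter, and the shrink loop by a first-ascent search.
import Mathlib
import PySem

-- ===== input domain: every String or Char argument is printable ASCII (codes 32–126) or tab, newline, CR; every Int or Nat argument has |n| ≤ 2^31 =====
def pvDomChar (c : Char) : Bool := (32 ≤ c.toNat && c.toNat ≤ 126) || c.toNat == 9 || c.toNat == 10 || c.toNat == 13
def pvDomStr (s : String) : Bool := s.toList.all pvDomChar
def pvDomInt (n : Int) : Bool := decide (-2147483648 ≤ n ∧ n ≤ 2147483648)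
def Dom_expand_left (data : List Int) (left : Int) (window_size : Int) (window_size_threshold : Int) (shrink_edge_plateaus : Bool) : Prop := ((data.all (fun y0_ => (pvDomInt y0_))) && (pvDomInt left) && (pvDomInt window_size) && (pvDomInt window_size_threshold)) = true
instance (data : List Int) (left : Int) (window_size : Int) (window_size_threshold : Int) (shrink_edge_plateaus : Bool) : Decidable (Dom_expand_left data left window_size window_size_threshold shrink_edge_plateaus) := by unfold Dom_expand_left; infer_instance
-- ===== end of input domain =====

-- B replaces A's min-of-slice rescan by a monotonic-deque sliding-window minimum,
-- the last_changed index by a run-length counter, and the shrink loop by a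
-- first-ascent search; equivalence is proved on Pre_ below (Pre_ excludes exactly
-- the inputs on which A raises).

-- data[j] for a nonnegative in-range index; default never reached inside Pre_
def pvD (data : List Int) (j : Int) : Int := (PySem.List.pyGet? data j).getD 0

-- ===== PORT A =====
-- the for-loop 'for i in range(max(0, left-1), 0, -1)' with breaks; fuel = current index i
def pvLoopA (data : List Int) (ws wst : Int) : Nat → Int → Int → Int
  | 0, exp, _ => exp
  | n+1, exp, lc =>
      if pvD data ((n : Int)+1) > pvD data ((n : Int)+1+1) then
        if pvD data ((n : Int)+1) > pvD data ((n : Int)+1+1) + 25 then exp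
        else
          -- last_changed = i from here on; Python raises on an empty slice (excluded by Pre_)
          if (PySem.List.min? (PySem.List.slice data (some (max 0 ((n : Int)+1 - ws))) (some ((n : Int)+1 - 1))) (fun x => x)).getD 0 ≥ pvD data ((n : Int)+1) then exp
          else if pvD data ((n : Int)+1) < wst ∧ ((n : Int)+1) - ((n : Int)+1) > ws then exp
          else pvLoopA data ws wst n ((n : Int)+1) ((n : Int)+1)
      else
        if pvD data ((n : Int)+1) < pvD data ((n : Int)+1+1) then
          if pvD data ((n : Int)+1) < wst ∧ ((n : Int)+1) - ((n : Int)+1) > ws then exp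
          else pvLoopA data ws wst n ((n : Int)+1) ((n : Int)+1)
        else
          if pvD data ((n : Int)+1) < wst ∧ lc - ((n : Int)+1) > ws then exp
          else pvLoopA data ws wst n ((n : Int)+1) lc

-- 'for i in range(expanded_left, left)' shrink loop; fuel = left - i
def pvShrinkA (data : List Int) : Nat → Int → Int → Int
  | 0, _, exp => exp
  | n+1, i, exp => if pvD data (i+1) > pvD data i then exp else pvShrinkA data n (i+1) i

def expand_left (data : List Int) (left : Int) (window_size : Int) (window_size_threshold : Int) (shrink_edge_plateaus : Bool) : Int :=
  let start := max 0 (left - 1)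
  let exp := pvLoopA data window_size window_size_threshold start.toNat left (left - 1)
  if shrink_edge_plateaus then pvShrinkA data (left - exp).toNat exp exp else exp

-- ===== PORT B =====
-- push index j at the (left) front of the deque, popping dominated candidates
def pvPush (data : List Int) (j : Int) (dq : List Int) : List Int :=
  j :: dq.dropWhile (fun k => pvD data j ≤ pvD data k)

-- pop indices > hi off the (right) back of the deque
def pvPopBack (hi : Int) : List Int → List Int
  | [] => []
  | k :: ks =>
      match pvPopBack hi ks with
      | [] => if k > hi then [] else [k]
      | r => k :: r

-- initial deque for the window [lo, lo+n-1], built right-to-left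
def pvBuildB (data : List Int) (lo : Int) : Nat → List Int
  | 0 => []
  | n+1 => pvPush data lo (pvBuildB data (lo+1) n)

-- the main while-loop of B; fuel = current index i, run = consecutive equal steps
def pvLoopB (data : List Int) (ws wst : Int) : Nat → Int → Int → List Int → Int
  | 0, exp, _, _ => exp
  | n+1, exp, run, dq =>
      if pvD data ((n : Int)+1) > pvD data ((n : Int)+1+1) ∧ pvD data ((n : Int)+1) > pvD data ((n : Int)+1+1) + 25 then exp
      else if pvD data ((n : Int)+1) > pvD data ((n : Int)+1+1) ∧ pvD data (dq.getLast?.getD 0) ≥ pvD data ((n : Int)+1) then exp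
      else
        if pvD data ((n : Int)+1) < wst ∧ (if pvD data ((n : Int)+1) = pvD data ((n : Int)+1+1) then run + 1 else 0) > ws then exp
        else
          pvLoopB data ws wst n ((n : Int)+1)
            (if pvD data ((n : Int)+1) = pvD data ((n : Int)+1+1) then run + 1 else 0)
            (if 2 ≤ ws ∧ 0 ≤ ((n : Int)+1) - 1 - ws
              then pvPush data (((n : Int)+1) - 1 - ws) (pvPopBack (((n : Int)+1) - 3) dq)
              else pvPopBack (((n : Int)+1) - 3) dq)

-- first index j' ≥ j with data[j'+1] > data[j']; fuel = left - j
def pvAscB (data : List Int) : Nat → Int → Int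
  | 0, j => j
  | n+1, j => if pvD data (j+1) > pvD data j then j else pvAscB data n (j+1)

def expand_left_alt (data : List Int) (left : Int) (window_size : Int) (window_size_threshold : Int) (shrink_edge_plateaus : Bool) : Int :=
  let start := left - 1
  let exp :=
    if start < 1 then left
    else
      pvLoopB data window_size window_size_threshold start.toNat left (-1)
        (pvBuildB data (max 0 (start - window_size)) ((start - 1 - max 0 (start - window_size)).toNat))
  if shrink_edge_plateaus then
    max exp (pvAscB data (left - exp).toNat exp - 1)
  else exp

-- ===== PRECONDITION & SPEC =====
-- closed-form helpers characterizing A's break/crash behaviour (used only by Pre_)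

-- least k in [j, left-1] with data[k] ≠ data[k+1], else left-1 (= last_changed when index j is reached)
def pvLC (data : List Int) (left : Int) (j : Int) : Int :=
  if _h : left - 1 ≤ j then left - 1
  else if pvD data j ≠ pvD data (j+1) then j else pvLC data left (j+1)
termination_by (left - 1 - j).toNat
decreasing_by omega

-- the min-of-window expression A evaluates at index i (meaningful when the window is nonempty)
def pvWinMin (data : List Int) (ws i : Int) : Int :=
  (PySem.List.min? (PySem.List.slice data (some (max 0 (i - ws))) (some (i - 1))) (fun x => x)).getD 0

-- A's backward scan stops (breaks or raises) at index j
def pvHalt (data : List Int) (ws wst left j : Int) : Bool :=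
  if pvD data j > pvD data (j+1) then
    decide (pvD data j > pvD data (j+1) + 25) || decide (j ≤ 1 ∨ ws ≤ 1)
      || decide (pvWinMin data ws j ≥ pvD data j)
      || (decide (pvD data j < wst) && decide ((0:Int) > ws))
  else if pvD data j < pvD data (j+1) then
    decide (pvD data j < wst) && decide ((0:Int) > ws)
  else
    decide (pvD data j < wst) && decide (pvLC data left j - j > ws)

-- A raises ValueError (min of an empty slice) at index j, if the scan reaches j
def pvCrash (data : List Int) (ws j : Int) : Bool :=
  decide (pvD data j > pvD data (j+1)) && !decide (pvD data j > pvD data (j+1) + 25)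
    && decide (j ≤ 1 ∨ ws ≤ 1)

-- Pre_ excludes EXACTLY the inputs on which A raises: left ≥ 2 with left out of range
-- (IndexError at data[left]), and inputs whose backward scan reaches a small-gap descent
-- with an empty min-window (min([]) ValueError), i.e. a crash index with no earlier stop
-- between it and left-1.
def Pre_expand_left (data : List Int) (left : Int) (window_size : Int) (window_size_threshold : Int) (shrink_edge_plateaus : Bool) : Prop :=
  2 ≤ left →
    (left < (data.length : Int) ∧
      ∀ i ∈ List.range ((left - 1).toNat + 1), 1 ≤ i →
        pvCrash data window_size (i : Int) = true →
        ∃ j ∈ List.range ((left - 1).toNat + 1), (i : Int) < (j : Int) ∧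
          pvHalt data window_size window_size_threshold left (j : Int) = true)
instance (data : List Int) (left : Int) (window_size : Int) (window_size_threshold : Int) (shrink_edge_plateaus : Bool) : Decidable (Pre_expand_left data left window_size window_size_threshold shrink_edge_plateaus) := by unfold Pre_expand_left; infer_instance

def pvWitness_expand_left : List Int × Int × Int × Int × Bool := ([1, 2, 3, 4], 3, 2, 0, true)

def Spec_expand_left (data : List Int) (left : Int) (window_size : Int) (window_size_threshold : Int) (shrink_edge_plateaus : Bool) (out : Int) : Prop := out = expand_left_alt data left window_size window_size_threshold shrink_edge_plateaus
instance (data : List Int) (left : Int) (window_size : Int) (window_size_threshold : Int) (shrink_edge_plateaus : Bool) (out : Int) : Decidable (Spec_expand_left data left window_size window_size_threshold shrink_edge_plateaus out) := by unfold Spec_expand_left; infer_instance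

-- ===== CLAIM (what is proved, stated in full; the proofs are below) =====
def Claim_equal_expand_left : Prop := ∀ (data : List Int) (left : Int) (window_size : Int) (window_size_threshold : Int) (shrink_edge_plateaus : Bool), Dom_expand_left data left window_size window_size_threshold shrink_edge_plateaus → Pre_expand_left data left window_size window_size_threshold shrink_edge_plateaus → Spec_expand_left data left window_size window_size_threshold shrink_edge_plateaus (expand_left data left window_size window_size_threshold shrink_edge_plateaus)

-- ===== LEMMAS AND PROOFS =====

theorem pvLC_top {data : List Int} {left j : Int} (h : left - 1 ≤ j) : pvLC data left j = left - 1 := by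
  rw [pvLC]; simp [h]

theorem pvLC_ne {data : List Int} {left j : Int} (h : j < left - 1) (hne : pvD data j ≠ pvD data (j+1)) :
    pvLC data left j = j := by
  rw [pvLC]; simp [not_le.mpr h, hne]

theorem pvLC_eq_step {data : List Int} {left j : Int} (h : j < left - 1) (heq : pvD data j = pvD data (j+1)) :
    pvLC data left j = pvLC data left (j+1) := by
  rw [pvLC]; simp [not_le.mpr h, heq]

-- specification of the deque contents: the left-to-right strict prefix minima of [lo, hi]
def pvCand (data : List Int) (lo hi : Int) : List Int :=
  if _h : hi < lo then []
  else pvPush data lo (pvCand data (lo+1) hi)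
termination_by (hi + 1 - lo).toNat
decreasing_by omega

theorem pvCand_of_lt {data : List Int} {lo hi : Int} (h : hi < lo) : pvCand data lo hi = [] := by
  rw [pvCand]; simp [h]

theorem pvCand_of_le {data : List Int} {lo hi : Int} (h : lo ≤ hi) :
    pvCand data lo hi = pvPush data lo (pvCand data (lo+1) hi) := by
  rw [pvCand]; simp [not_lt.mpr h]

theorem pvGetLast?_dropWhile {p : Int → Bool} {l : List Int} (h : l.dropWhile p ≠ []) :
    (l.dropWhile p).getLast? = l.getLast? := by
  induction l with
  | nil => simp at h
  | cons x xs ih =>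
      by_cases hp : p x
      · rw [List.dropWhile_cons_of_pos hp] at h ⊢
        rw [ih h]
        have hxs : xs ≠ [] := by rintro rfl; simp at h
        cases xs with
        | nil => exact absurd rfl hxs
        | cons y ys => simp
      · rw [List.dropWhile_cons_of_neg hp]

theorem pvDropWhile_head_false {p : Int → Bool} {l r : List Int} {q : Int}
    (h : l.dropWhile p = q :: r) : p q = false := by
  induction l with
  | nil => simp at h
  | cons x xs ih =>
      by_cases hp : p x
      · rw [List.dropWhile_cons_of_pos hp] at h; exact ih h
      · rw [List.dropWhile_cons_of_neg hp] at h
        cases h; simpa using hp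

theorem pvCand_mem_aux (data : List Int) (hi : Int) :
    ∀ (n : Nat) (lo : Int), (hi + 1 - lo).toNat ≤ n → ∀ j ∈ pvCand data lo hi, lo ≤ j ∧ j ≤ hi := by
  intro n
  induction n with
  | zero =>
      intro lo hn j hj
      rw [pvCand_of_lt (by omega)] at hj
      simp at hj
  | succ n ih =>
      intro lo hn j hj
      by_cases hlt : hi < lo
      · rw [pvCand_of_lt hlt] at hj; simp at hj
      · push_neg at hlt
        rw [pvCand_of_le hlt, pvPush] at hj
        rcases List.mem_cons.mp hj with rfl | hj'
        · exact ⟨le_refl _, hlt⟩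
        · have hj'' : j ∈ pvCand data (lo+1) hi := (List.dropWhile_sublist ..).subset hj'
          have := ih (lo+1) (by omega) j hj''
          omega

theorem pvCand_mem {data : List Int} {lo hi j : Int} (h : j ∈ pvCand data lo hi) :
    lo ≤ j ∧ j ≤ hi :=
  pvCand_mem_aux data hi (hi + 1 - lo).toNat lo (le_refl _) j h

theorem pvCand_sorted (data : List Int) (lo hi : Int) :
    (pvCand data lo hi).Pairwise (· < ·) := by
  by_cases hlt : hi < lo
  · rw [pvCand_of_lt hlt]; exact List.Pairwise.nil
  · push_neg at hlt
    have : ∀ (n : Nat) (lo : Int), (hi + 1 - lo).toNat ≤ n → (pvCand data lo hi).Pairwise (· < ·) := by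
      intro n
      induction n with
      | zero => intro lo hn; rw [pvCand_of_lt (by omega)]; exact List.Pairwise.nil
      | succ n ih =>
          intro lo hn
          by_cases hlt' : hi < lo
          · rw [pvCand_of_lt hlt']; exact List.Pairwise.nil
          · push_neg at hlt'
            rw [pvCand_of_le hlt', pvPush]
            refine List.pairwise_cons.mpr ⟨?_, ?_⟩
            · intro j hj
              have : j ∈ pvCand data (lo+1) hi := (List.dropWhile_sublist ..).subset hj
              have := pvCand_mem this
              omega
            · exact (ih (lo+1) (by omega)).sublist (List.dropWhile_sublist ..)
    exact this (hi + 1 - lo).toNat lo (le_refl _)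

theorem pvCand_min_aux (data : List Int) (hi : Int) :
    ∀ (n : Nat) (lo : Int), (hi + 1 - lo).toNat ≤ n → lo ≤ hi →
      ∃ j, (pvCand data lo hi).getLast? = some j ∧ lo ≤ j ∧ j ≤ hi ∧
        ∀ k : Int, lo ≤ k → k ≤ hi → pvD data j ≤ pvD data k := by
  intro n
  induction n with
  | zero => intro lo hn hle; omega
  | succ n ih =>
      intro lo hn hle
      rw [pvCand_of_le hle, pvPush]
      cases hdw : (pvCand data (lo+1) hi).dropWhile (fun k => decide (pvD data lo ≤ pvD data k)) with
      | nil =>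
          refine ⟨lo, by simp [hdw], le_refl _, hle, ?_⟩
          intro k hk1 hk2
          rcases eq_or_lt_of_le hk1 with rfl | hk
          · exact le_refl _
          · obtain ⟨j', hgl, hb1, hb2, hmin⟩ := ih (lo+1) (by omega) (by omega)
            have hj'mem : j' ∈ pvCand data (lo+1) hi := List.mem_of_getLast? hgl
            have hall := List.dropWhile_eq_nil_iff.mp hdw
            have := hall j' hj'mem
            simp at this
            calc pvD data lo ≤ pvD data j' := this
              _ ≤ pvD data k := hmin k (by omega) hk2
      | cons q r =>
          have hlo_lt : lo < hi := by
            rcases eq_or_lt_of_le hle with rfl | h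
            · rw [pvCand_of_lt (by omega)] at hdw; simp at hdw
            · exact h
          obtain ⟨j', hgl, hb1, hb2, hmin⟩ := ih (lo+1) (by omega) (by omega)
          have hne : (pvCand data (lo+1) hi).dropWhile (fun k => decide (pvD data lo ≤ pvD data k)) ≠ [] := by
            rw [hdw]; simp
          refine ⟨j', ?_, by omega, hb2, ?_⟩
          · have h2 : (q :: r).getLast? = some j' := by
              rw [← hdw, pvGetLast?_dropWhile hne, hgl]
            simpa using h2
          · intro k hk1 hk2
            rcases eq_or_lt_of_le hk1 with heq | hk
            · have hqf := pvDropWhile_head_false hdw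
              have hqmem : q ∈ pvCand data (lo+1) hi := (List.dropWhile_sublist ..).subset (hdw ▸ List.mem_cons_self ..)
              have hqb := pvCand_mem hqmem
              have h3 : ¬ (pvD data lo ≤ pvD data q) := by simpa using hqf
              have h4 := hmin q (by omega) (by omega)
              rw [← heq]
              omega
            · exact hmin k (by omega) hk2

theorem pvCand_min {data : List Int} {lo hi : Int} (h : lo ≤ hi) :
    ∃ j, (pvCand data lo hi).getLast? = some j ∧ lo ≤ j ∧ j ≤ hi ∧
      ∀ k : Int, lo ≤ k → k ≤ hi → pvD data j ≤ pvD data k :=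
  pvCand_min_aux data hi (hi + 1 - lo).toNat lo (le_refl _) h

theorem pvPopBack_sorted {hi : Int} {l : List Int} (h : l.Pairwise (· < ·)) :
    pvPopBack hi l = l.takeWhile (fun k => decide (k ≤ hi)) := by
  induction l with
  | nil => rfl
  | cons k ks ih =>
      have hks := (List.pairwise_cons.mp h).2
      have hhead := (List.pairwise_cons.mp h).1
      rw [pvPopBack, ih hks]
      by_cases hk : k ≤ hi
      · rw [List.takeWhile_cons_of_pos (by simpa using hk)]
        cases htw : ks.takeWhile (fun k => decide (k ≤ hi)) with
        | nil => simp [not_lt.mpr hk]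
        | cons x xs => simp
      · rw [List.takeWhile_cons_of_neg (by simpa using hk)]
        have htw : ks.takeWhile (fun k => decide (k ≤ hi)) = [] := by
          cases hks' : ks with
          | nil => rfl
          | cons y ys =>
              have : k < y := hhead y (by simp [hks'])
              rw [List.takeWhile_cons_of_neg (by simp; omega)]
        rw [htw]
        simp [lt_of_not_ge hk]

theorem pvTwDw_comm {hi' : Int} {p : Int → Bool} :
    ∀ {l : List Int}, l.Pairwise (· < ·) →
      (l.dropWhile p).takeWhile (fun k => decide (k ≤ hi'))
        = (l.takeWhile (fun k => decide (k ≤ hi'))).dropWhile p := by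
  intro l
  induction l with
  | nil => intro _; rfl
  | cons x xs ih =>
      intro h
      have hxs := (List.pairwise_cons.mp h).2
      have hhead := (List.pairwise_cons.mp h).1
      by_cases hp : p x
      · rw [List.dropWhile_cons_of_pos hp]
        by_cases hq : x ≤ hi'
        · rw [List.takeWhile_cons_of_pos (by simpa using hq), List.dropWhile_cons_of_pos hp]
          exact ih hxs
        · rw [List.takeWhile_cons_of_neg (by simpa using hq), List.dropWhile_nil]
          have htw : ∀ m, m ∈ xs.dropWhile p → ¬ (m ≤ hi') := by
            intro m hm
            have : x < m := hhead m ((List.dropWhile_sublist ..).subset hm)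
            omega
          cases hd : xs.dropWhile p with
          | nil => rfl
          | cons y ys =>
              rw [List.takeWhile_cons_of_neg (by simp; exact lt_of_not_ge (htw y (by simp [hd])))]
      · rw [List.dropWhile_cons_of_neg hp]
        by_cases hq : x ≤ hi'
        · rw [List.takeWhile_cons_of_pos (by simpa using hq), List.dropWhile_cons_of_neg hp]
        · rw [List.takeWhile_cons_of_neg (by simpa using hq), List.dropWhile_nil]

theorem pvCand_take_aux (data : List Int) (hi hi' : Int) (h : hi' ≤ hi) :
    ∀ (n : Nat) (lo : Int), (hi + 1 - lo).toNat ≤ n →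
      (pvCand data lo hi).takeWhile (fun k => decide (k ≤ hi')) = pvCand data lo hi' := by
  intro n
  induction n with
  | zero =>
      intro lo hn
      rw [pvCand_of_lt (by omega), pvCand_of_lt (by omega)]
      rfl
  | succ n ih =>
      intro lo hn
      by_cases hlt : hi < lo
      · rw [pvCand_of_lt hlt, pvCand_of_lt (by omega)]; rfl
      · push_neg at hlt
        rw [pvCand_of_le hlt, pvPush]
        by_cases hlo : lo ≤ hi'
        · rw [List.takeWhile_cons_of_pos (by simpa using hlo),
            pvCand_of_le hlo, pvPush]
          congr 1
          rw [pvTwDw_comm (pvCand_sorted data (lo+1) hi), ih (lo+1) (by omega)]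
        · rw [List.takeWhile_cons_of_neg (by simpa using hlo), pvCand_of_lt (by omega)]

theorem pvCand_take {data : List Int} {lo hi hi' : Int} (h : hi' ≤ hi) :
    (pvCand data lo hi).takeWhile (fun k => decide (k ≤ hi')) = pvCand data lo hi' :=
  pvCand_take_aux data hi hi' h (hi + 1 - lo).toNat lo (le_refl _)

theorem pvPopBack_cand {data : List Int} {lo hi hi' : Int} (h : hi' ≤ hi) :
    pvPopBack hi' (pvCand data lo hi) = pvCand data lo hi' := by
  rw [pvPopBack_sorted (pvCand_sorted data lo hi), pvCand_take h]

theorem pvBuildB_cand (data : List Int) : ∀ (n : Nat) (lo : Int),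
    pvBuildB data lo n = pvCand data lo (lo + n - 1) := by
  intro n
  induction n with
  | zero => intro lo; rw [pvBuildB, pvCand_of_lt (by omega)]
  | succ n ih =>
      intro lo
      rw [pvBuildB, ih (lo+1)]
      have h1 : lo + 1 + (n : Int) - 1 = lo + (n : Int) := by ring
      have h2 : lo + ((n : Nat) + 1 : Nat) - 1 = lo + (n : Int) := by push_cast; ring
      rw [h1, h2, pvCand_of_le (show lo ≤ lo + (n : Int) by omega)]

theorem pvD_int (data : List Int) (k : Int) (h0 : 0 ≤ k) (h1 : k < (data.length : Int)) :
    pvD data k = data[k.toNat]'(by omega) := by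
  simp [pvD, PySem.List.pyGet?_of_nonneg data h0, List.getElem?_eq_getElem (show k.toNat < data.length by omega)]

theorem pvMin_bridge {data : List Int} {lo hi : Int} (h0 : 0 ≤ lo) (h1 : lo ≤ hi)
    (h2 : hi < (data.length : Int)) :
    (PySem.List.min? (PySem.List.slice data (some lo) (some (hi+1))) (fun x => x)).getD 0
      = pvD data ((pvCand data lo hi).getLast?.getD 0) := by
  have hs : PySem.List.slice data (some lo) (some (hi+1))
      = (data.drop lo.toNat).take ((hi+1).toNat - lo.toNat) := PySem.List.slice_toNat data h0 (by omega)
  set s := PySem.List.slice data (some lo) (some (hi+1)) with hsdef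
  have hslen : s.length = (hi+1).toNat - lo.toNat := by
    rw [hs]; simp; omega
  have hsne : s ≠ [] := by
    intro hnil; rw [hnil] at hslen; simp at hslen; omega
  obtain ⟨m, hm⟩ : ∃ m, PySem.List.min? s (fun x => x) = some m := by
    cases hmm : PySem.List.min? s (fun x => x) with
    | none => exact absurd ((PySem.List.min?_eq_none_iff s (fun x => x)).mp hmm) hsne
    | some m => exact ⟨m, rfl⟩
  have hget : ∀ (t : Nat) (ht : t < s.length), s[t] = data[lo.toNat + t]'(by omega) := by
    intro t ht
    have ht' : t < s.length := ht
    rw [hslen] at ht'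
    simp only [hs]
    rw [List.getElem_take, List.getElem_drop]
  obtain ⟨j, hj, hj1, hj2, hjmin⟩ := pvCand_min (data := data) h1
  rw [hj, hm]
  simp only [Option.getD_some]
  have hmem : pvD data j ∈ s := by
    rw [List.mem_iff_getElem]
    refine ⟨j.toNat - lo.toNat, by omega, ?_⟩
    rw [hget _ (by omega)]
    rw [pvD_int data j (by omega) (by omega)]
    congr 1
    omega
  have hle1 : m ≤ pvD data j := by
    have := PySem.List.min?_isMin hm (pvD data j) hmem
    simpa using this
  have hmm : m ∈ s := PySem.List.min?_mem hm
  obtain ⟨t, ht, hts⟩ := List.mem_iff_getElem.mp hmm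
  have hm2 : m = pvD data (lo + (t : Int)) := by
    rw [← hts, hget t ht]
    rw [pvD_int data (lo + (t : Int)) (by omega) (by push_cast; omega)]
    congr 1
    omega
  have hle2 : pvD data j ≤ m := by
    rw [hm2]
    exact hjmin _ (by omega) (by rw [hslen] at ht; omega)
  omega

theorem pvStep_cand (data : List Int) (ws i : Int) (h1 : 1 ≤ i) :
    (if 2 ≤ ws ∧ 0 ≤ i - 1 - ws
      then pvPush data (i - 1 - ws) (pvPopBack (i - 3) (pvCand data (max 0 (i - ws)) (i - 2)))
      else pvPopBack (i - 3) (pvCand data (max 0 (i - ws)) (i - 2)))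
      = pvCand data (max 0 (i - 1 - ws)) (i - 3) := by
  by_cases hws : 2 ≤ ws
  · by_cases hj : 0 ≤ i - 1 - ws
    · rw [if_pos ⟨hws, hj⟩]
      have e1 : max 0 (i - ws) = i - ws := by omega
      have e2 : max 0 (i - 1 - ws) = i - 1 - ws := by omega
      rw [e1, e2, pvPopBack_cand (by omega),
        pvCand_of_le (show i - 1 - ws ≤ i - 3 by omega)]
      congr 2
      ring
    · rw [if_neg (by tauto)]
      have e1 : max 0 (i - ws) = 0 := by omega
      have e2 : max 0 (i - 1 - ws) = 0 := by omega
      rw [e1, e2, pvPopBack_cand (by omega)]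
  · rw [if_neg (by tauto)]
    have e1 : pvCand data (max 0 (i - ws)) (i - 2) = [] := pvCand_of_lt (by omega)
    have e2 : pvCand data (max 0 (i - 1 - ws)) (i - 3) = [] := pvCand_of_lt (by omega)
    rw [e1, e2]
    rfl

theorem pvLoop_eq (data : List Int) (ws wst left : Int) (hlen : left < (data.length : Int))
    (hpre2 : ∀ i : Int, 1 ≤ i → i ≤ left - 1 → pvCrash data ws i = true →
      ∃ j : Int, i < j ∧ j ≤ left - 1 ∧ pvHalt data ws wst left j = true) :
    ∀ (n : Nat) (exp lc run : Int) (dq : List Int),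
      (n : Int) ≤ left - 1 →
      run = lc - ((n : Int) + 1) →
      lc = pvLC data left ((n : Int) + 1) →
      (∀ j : Int, (n : Int) < j → j ≤ left - 1 → pvHalt data ws wst left j = false) →
      dq = pvCand data (max 0 ((n : Int) - ws)) ((n : Int) - 2) →
      pvLoopA data ws wst n exp lc = pvLoopB data ws wst n exp run dq := by
  intro n
  induction n with
  | zero => intro exp lc run dq _ _ _ _ _; rfl
  | succ n ih =>
      intro exp lc run dq hle hrun hlc hnh hdq
      have hcast : ((n + 1 : Nat) : Int) = (n : Int) + 1 := by push_cast; ring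
      rw [hcast] at hle hrun hlc hnh hdq
      set i : Int := (n : Int) + 1 with hi
      simp only [pvLoopA, pvLoopB]
      by_cases hab : pvD data (i) > pvD data (i+1)
      · by_cases hbig : pvD data (i) > pvD data (i+1) + 25
        · rw [if_pos hab, if_pos hbig, if_pos ⟨hab, hbig⟩]
        · -- small-gap descent: Pre_ forbids an empty window here
          have hwin : ¬ (i ≤ 1 ∨ ws ≤ 1) := by
            intro hemp
            have hcr : pvCrash data ws i = true := by
              unfold pvCrash
              simp [hab, hbig, hemp]
            obtain ⟨j, hj1, hj2, hj3⟩ := hpre2 i (by omega) (by omega) hcr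
            have := hnh j (by omega) hj2
            rw [this] at hj3
            exact Bool.false_ne_true hj3
          push_neg at hwin
          obtain ⟨h2i, h2ws⟩ := hwin
          have hbr := pvMin_bridge (data := data) (lo := max 0 (i - ws)) (hi := i-2)
            (by omega) (by omega) (by omega)
          have e1 : i-2+1 = i-1 := by ring
          rw [e1] at hbr
          rw [← hdq] at hbr
          rw [if_pos hab, if_neg hbig,
            if_neg (show ¬(pvD data i > pvD data (i+1) ∧ pvD data i > pvD data (i+1) + 25) from fun h => hbig h.2),
            hbr]
          by_cases hmin : pvD data (dq.getLast?.getD 0) ≥ pvD data i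
          · rw [if_pos hmin, if_pos ⟨hab, hmin⟩]
          · rw [if_neg hmin,
              if_neg (show ¬(pvD data i > pvD data (i+1) ∧ pvD data (dq.getLast?.getD 0) ≥ pvD data i) from fun h => hmin h.2)]
            have hne : ¬ pvD data i = pvD data (i+1) := by omega
            rw [if_neg hne]
            have hcond : (pvD data i < wst ∧ i - i > ws)
                ↔ (pvD data i < wst ∧ (0 : Int) > ws) := by
              constructor <;> (rintro ⟨hx, hy⟩; exact ⟨hx, by omega⟩)
            by_cases hc : pvD data i < wst ∧ (0 : Int) > ws
            · rw [if_pos (hcond.mpr hc), if_pos hc]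
            · rw [if_neg (fun h => hc (hcond.mp h)), if_neg hc]
              have hnh' : ∀ j : Int, (n : Int) < j → j ≤ left - 1 → pvHalt data ws wst left j = false := by
                intro j hj1 hj2
                rcases eq_or_lt_of_le (show (n : Int) + 1 ≤ j by omega) with rfl | hj3
                · rw [← hi]
                  unfold pvHalt
                  rw [if_pos hab]
                  have hbr' : pvWinMin data ws i = pvD data (dq.getLast?.getD 0) := hbr
                  simp only [hbr']
                  simp [hbig, not_or, h2i.not_ge, h2ws.not_ge, hmin]
                  intro h ; omega
                · exact hnh j (by omega) hj2
              have hlc' : (i : Int) = pvLC data left i := by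
                by_cases htop : left - 1 ≤ i
                · rw [pvLC_top htop]; omega
                · rw [pvLC_ne (by omega) hne]
              rw [hdq, pvStep_cand data ws i (by omega)]
              have e2 : i-1-ws = (n : Int) - ws := by omega
              have e3 : i-3 = (n : Int) - 2 := by omega
              rw [e2, e3]
              exact ih i i 0 _ (by omega) (by omega) (by rw [← hlc']) hnh' rfl
      · rw [if_neg hab,
          if_neg (show ¬(pvD data i > pvD data (i+1) ∧ pvD data i > pvD data (i+1) + 25) from fun h => hab h.1),
          if_neg (show ¬(pvD data i > pvD data (i+1) ∧ pvD data (dq.getLast?.getD 0) ≥ pvD data i) from fun h => hab h.1)]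
        by_cases hlt : pvD data i < pvD data (i+1)
        · rw [if_pos hlt]
          have hne : ¬ pvD data i = pvD data (i+1) := by omega
          rw [if_neg hne]
          have hcond : (pvD data i < wst ∧ i - i > ws)
              ↔ (pvD data i < wst ∧ (0 : Int) > ws) := by
            constructor <;> (rintro ⟨hx, hy⟩; exact ⟨hx, by omega⟩)
          by_cases hc : pvD data i < wst ∧ (0 : Int) > ws
          · rw [if_pos (hcond.mpr hc), if_pos hc]
          · rw [if_neg (fun h => hc (hcond.mp h)), if_neg hc]
            have hnh' : ∀ j : Int, (n : Int) < j → j ≤ left - 1 → pvHalt data ws wst left j = false := by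
              intro j hj1 hj2
              rcases eq_or_lt_of_le (show (n : Int) + 1 ≤ j by omega) with rfl | hj3
              · rw [← hi]
                unfold pvHalt
                rw [if_neg hab, if_pos hlt]
                simp only [Bool.and_eq_false_iff, decide_eq_false_iff_not]
                by_cases hw : pvD data i < wst
                · right; omega
                · left; exact hw
              · exact hnh j (by omega) hj2
            have hlc' : (i : Int) = pvLC data left i := by
              by_cases htop : left - 1 ≤ i
              · rw [pvLC_top htop]; omega
              · rw [pvLC_ne (by omega) hne]
            rw [hdq, pvStep_cand data ws i (by omega)]
            have e2 : i-1-ws = (n : Int) - ws := by omega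
            have e3 : i-3 = (n : Int) - 2 := by omega
            rw [e2, e3]
            exact ih i i 0 _ (by omega) (by omega) (by rw [← hlc']) hnh' rfl
        · rw [if_neg hlt]
          have heq : pvD data i = pvD data (i+1) := by omega
          rw [if_pos heq]
          have hlci : lc = pvLC data left i := by
            by_cases htop : left - 1 ≤ i
            · rw [pvLC_top htop]
              rw [hlc, pvLC_top (by omega)]
            · rw [pvLC_eq_step (by omega) heq, ← hlc]
          have hcond : (pvD data i < wst ∧ lc - i > ws)
              ↔ (pvD data i < wst ∧ run + 1 > ws) := by
            constructor <;> (rintro ⟨hx, hy⟩; exact ⟨hx, by omega⟩)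
          by_cases hc : pvD data i < wst ∧ run + 1 > ws
          · rw [if_pos (hcond.mpr hc), if_pos hc]
          · rw [if_neg (fun h => hc (hcond.mp h)), if_neg hc]
            have hnh' : ∀ j : Int, (n : Int) < j → j ≤ left - 1 → pvHalt data ws wst left j = false := by
              intro j hj1 hj2
              rcases eq_or_lt_of_le (show (n : Int) + 1 ≤ j by omega) with rfl | hj3
              · rw [← hi]
                unfold pvHalt
                rw [if_neg hab, if_neg hlt]
                simp only [Bool.and_eq_false_iff, decide_eq_false_iff_not]
                by_cases hw : pvD data i < wst
                · right
                  rw [← hlci]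
                  omega
                · left; exact hw
              · exact hnh j (by omega) hj2
            rw [hdq, pvStep_cand data ws i (by omega)]
            have e2 : i-1-ws = (n : Int) - ws := by omega
            have e3 : i-3 = (n : Int) - 2 := by omega
            rw [e2, e3]
            exact ih i lc (run + 1) _ (by omega) (by omega) (by rw [← hlci]) hnh' rfl

theorem pvAscB_ge (data : List Int) : ∀ (n : Nat) (j : Int), j ≤ pvAscB data n j := by
  intro n
  induction n with
  | zero => intro j; simp [pvAscB]
  | succ n ih =>
      intro j
      simp only [pvAscB]
      split
      · exact le_refl j
      · exact le_trans (by omega) (ih (j+1))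

theorem pvShrink_eq (data : List Int) :
    ∀ (n : Nat) (i exp : Int), i - 1 ≤ exp → exp ≤ i →
      pvShrinkA data n i exp = max exp (pvAscB data n i - 1) := by
  intro n
  induction n with
  | zero => intro i exp h1 h2; simp [pvShrinkA, pvAscB]; omega
  | succ n ih =>
      intro i exp h1 h2
      simp only [pvShrinkA, pvAscB]
      split
      · omega
      · rw [ih (i+1) i (by omega) (by omega)]
        have := pvAscB_ge data n (i+1)
        omega

-- ===== VERDICT (by name: the statement is the Claim_ definition above) =====
theorem expand_left_spec : Claim_equal_expand_left := by
  intro data left ws wst sh hdom hpre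
  unfold Spec_expand_left expand_left expand_left_alt
  by_cases hl : 2 ≤ left
  · obtain ⟨hlen, hq'⟩ := hpre hl
    have hpre2 : ∀ i : Int, 1 ≤ i → i ≤ left - 1 → pvCrash data ws i = true →
        ∃ j : Int, i < j ∧ j ≤ left - 1 ∧ pvHalt data ws wst left j = true := by
      intro i hi1 hi2 hcr
      have hmem : i.toNat ∈ List.range ((left - 1).toNat + 1) := by
        rw [List.mem_range]; omega
      have hcast : ((i.toNat : Nat) : Int) = i := by omega
      obtain ⟨j, hjmem, hj1, hj2⟩ := hq' i.toNat hmem (by omega) (by rw [hcast]; exact hcr)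
      rw [List.mem_range] at hjmem
      rw [hcast] at hj1
      exact ⟨(j : Int), hj1, by omega, hj2⟩
    have hs1 : max 0 (left - 1) = left - 1 := by omega
    have hs2 : ¬ (left - 1 < 1) := by omega
    have hcastn : (((left - 1).toNat : Nat) : Int) = left - 1 := by omega
    have hbuild : pvBuildB data (max 0 (left - 1 - ws)) ((left - 1 - 1 - max 0 (left - 1 - ws)).toNat)
        = pvCand data (max 0 ((left - 1 : Int) - ws)) ((left - 1 : Int) - 2) := by
      rw [pvBuildB_cand]
      by_cases hc : max 0 (left - 1 - ws) ≤ left - 2 - max 0 (left - 1 - ws) + max 0 (left - 1 - ws)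
      · congr 1
        omega
      · rw [pvCand_of_lt (by omega), pvCand_of_lt (by omega)]
    have hnh0 : ∀ j : Int, (((left - 1).toNat : Nat) : Int) < j → j ≤ left - 1 →
        pvHalt data ws wst left j = false := by
      intro j hj1 hj2
      rw [hcastn] at hj1
      omega
    have hloop := pvLoop_eq data ws wst left hlen hpre2 (left - 1).toNat left (left - 1) (-1)
      (pvBuildB data (max 0 (left - 1 - ws)) ((left - 1 - 1 - max 0 (left - 1 - ws)).toNat))
      (by omega) (by omega) (by rw [hcastn, pvLC_top (by omega)]) hnh0 (by rw [hbuild, hcastn])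
    simp only [hs1, if_neg hs2, hcastn] at *
    rw [hloop]
    by_cases hsh : sh = true
    · simp only [hsh, if_pos]
      exact pvShrink_eq data _ _ _ (by omega) (le_refl _)
    · simp only [Bool.not_eq_true] at hsh
      simp [hsh]
  · have e0 : max 0 (left - 1) = 0 := by omega
    have h1 : left - 1 < 1 := by omega
    simp only [e0, Int.toNat_zero, if_pos h1, pvLoopA]
    have e2 : (left - left).toNat = 0 := by omega
    simp only [e2, pvShrinkA, pvAscB]
    by_cases hsh : sh = true
    · simp only [hsh, if_pos]
      omega
    · simp only [Bool.not_eq_true] at hsh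
      simp [hsh]
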